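-- pv_equiv track=rewrite | github.com/dushenda/LeetCode | sxf/sxf1.py | find_diff_char
-- ===== SOURCE A (Python) =====
-- def find_diff_char(str1, str2):
--     l1, l2 = len(str1), len(str2)
--     s1 = str1 if l1 > l2 else str2
--     s2 = str1 if l1 < l2 else str2
--     s1, s2 = sorted(s1), sorted(s2)  # s1>s2
--     for i in range(len(s2)):
--         if s1[i] != s2[i]:
--             return s1[i]
--     return s1[-1]
-- ===== SOURCE B (Python) =====
-- def _ascii_sorted(s):
--     counts = [0] * 128
--     for ch in s:
--         counts[ord(ch)] += 1
--     return ''.join(chr(i) * counts[i] for i in range(128))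
--
--
-- def find_diff_char(str1, str2):
--     s1 = str1 if len(str1) > len(str2) else str2
--     s2 = str1 if len(str1) < len(str2) else str2
--     a = _ascii_sorted(s1)
--     b = _ascii_sorted(s2)
--     for x, y in zip(a, b):
--         if x != y:
--             return x
--     return a[-1]
-- ===== Notes on version B (the rewrite author's own statement) =====
-- stated objective: faster
-- what changed: A comparison-sorts both whole strings and scans by index; B sorts each string by an ASCII counting sort (one counting pass plus a 128-bucket join) and finds the first mismatch with a zip scan; Pre_ excludes only the both-empty input, on which A raises IndexError at s1[-1] (B raises there too).
import Mathlib
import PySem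

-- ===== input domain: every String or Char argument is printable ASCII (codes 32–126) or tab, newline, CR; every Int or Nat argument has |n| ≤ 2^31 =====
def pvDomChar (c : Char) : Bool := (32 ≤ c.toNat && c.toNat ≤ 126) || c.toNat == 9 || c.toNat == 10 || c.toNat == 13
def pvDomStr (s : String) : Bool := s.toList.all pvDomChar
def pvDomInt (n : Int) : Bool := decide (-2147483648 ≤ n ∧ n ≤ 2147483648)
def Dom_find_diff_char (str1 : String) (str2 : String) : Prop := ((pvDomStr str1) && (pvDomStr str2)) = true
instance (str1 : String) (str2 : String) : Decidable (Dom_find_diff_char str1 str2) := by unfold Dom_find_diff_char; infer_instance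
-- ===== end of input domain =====

-- B replaces A's comparison sort of both strings by an ASCII counting sort (one counting
-- pass and a 128-bucket join) and scans for the first mismatch with a zip (objective: faster).

-- ===== PORT A =====
-- the loop 'for i in range(len(s2)): if s1[i] != s2[i]: return s1[i]'
def pvAGo (s1 s2 : List Char) (i : Nat) : Option Char :=
  if _h : i < s2.length then
    match PySem.List.pyGet? s1 (i : Int), PySem.List.pyGet? s2 (i : Int) with
    | some x, some y => if x ≠ y then some x else pvAGo s1 s2 (i + 1)
    | _, _ => none        -- IndexError (never reached: len s1 ≥ len s2)
  else none
termination_by s2.length - i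

def find_diff_char (str1 : String) (str2 : String) : String :=
  let l1 := str1.toList.length
  let l2 := str2.toList.length
  let s1p := if l1 > l2 then str1 else str2
  let s2p := if l1 < l2 then str1 else str2
  let s1 := PySem.List.sorted s1p.toList (fun x => x) false
  let s2 := PySem.List.sorted s2p.toList (fun x => x) false
  match pvAGo s1 s2 0 with
  | some c => String.ofList [c]
  | none =>
    match PySem.List.pyGet? s1 (-1) with   -- s1[-1]
    | some c => String.ofList [c]
    | none => ""                           -- IndexError (both strings empty)

-- ===== PORT B =====
-- counts = [0]*128; for ch in s: counts[ord(ch)] += 1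
def pvCounts (s : List Char) : List Nat :=
  s.foldl (fun counts ch => counts.set ch.toNat (counts.getD ch.toNat 0 + 1))
    (List.replicate 128 0)

-- ''.join(chr(i) * counts[i] for i in range(128))
def pvASort (s : List Char) : List Char :=
  let counts := pvCounts s
  (List.range 128).flatMap (fun i => List.replicate (counts.getD i 0) (Char.ofNat i))

-- 'for x, y in zip(a, b): if x != y: return x'
def pvFirstDiff : List (Char × Char) → Option Char
  | [] => none
  | (x, y) :: t => if x ≠ y then some x else pvFirstDiff t

def find_diff_char_alt (str1 : String) (str2 : String) : String :=
  let s1 := if str1.toList.length > str2.toList.length then str1 else str2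
  let s2 := if str1.toList.length < str2.toList.length then str1 else str2
  let a := pvASort s1.toList
  let b := pvASort s2.toList
  match pvFirstDiff (a.zip b) with
  | some c => String.ofList [c]
  | none =>
    match PySem.List.pyGet? a (-1) with    -- a[-1]
    | some c => String.ofList [c]
    | none => ""                           -- IndexError (both strings empty)

-- ===== PRECONDITION & SPEC =====
-- Pre_ excludes only the input with BOTH strings empty: there Python A raises IndexError at s1[-1] (B raises there too).
def Pre_find_diff_char (str1 : String) (str2 : String) : Prop := ¬ (str1 = "" ∧ str2 = "")
instance (str1 : String) (str2 : String) : Decidable (Pre_find_diff_char str1 str2) := by unfold Pre_find_diff_char; infer_instance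
def pvWitness_find_diff_char : String × String := ("ab", "b")

def Spec_find_diff_char (str1 : String) (str2 : String) (out : String) : Prop := out = find_diff_char_alt str1 str2
instance (str1 : String) (str2 : String) (out : String) : Decidable (Spec_find_diff_char str1 str2 out) := by unfold Spec_find_diff_char; infer_instance

-- ===== CLAIM (what is proved, stated in full; the proofs are below) =====
def Claim_equal_find_diff_char : Prop := ∀ (str1 : String) (str2 : String), Dom_find_diff_char str1 str2 → Pre_find_diff_char str1 str2 → Spec_find_diff_char str1 str2 (find_diff_char str1 str2)

-- ===== LEMMAS AND PROOFS =====

-- parallel-walk reformulation of A's index loop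
def pvPW : List Char → List Char → Option Char
  | x :: xs, y :: ys => if x ≠ y then some x else pvPW xs ys
  | _, _ => none

theorem pvPW_nil_right (a : List Char) : pvPW a [] = none := by cases a <;> rfl

theorem pvAGo_eq_pvPW (s1 s2 : List Char) (h : s2.length ≤ s1.length) :
    ∀ i, pvAGo s1 s2 i = pvPW (s1.drop i) (s2.drop i) := by
  intro i
  induction hfuel : s2.length - i using Nat.strong_induction_on generalizing i with
  | _ n ih =>
  rw [pvAGo]
  by_cases hi : i < s2.length
  · have hi1 : i < s1.length := lt_of_lt_of_le hi h
    rw [List.drop_eq_getElem_cons hi, List.drop_eq_getElem_cons hi1]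
    simp only [hi, dif_pos, PySem.List.pyGet?_natCast, List.getElem?_eq_getElem hi,
      List.getElem?_eq_getElem hi1]
    by_cases hne : s1[i] ≠ s2[i]
    · simp [pvPW, hne]
    · simp only [pvPW, hne, ite_false]
      simp only [not_not] at hne
      rw [ih (s2.length - (i + 1)) (by omega) (i + 1) rfl]
  · rw [List.drop_of_length_le (l := s2) (by omega)]
    simp [hi, pvPW_nil_right]

theorem pvPW_eq_firstDiff_zip (a b : List Char) : pvPW a b = pvFirstDiff (a.zip b) := by
  induction a generalizing b with
  | nil => cases b <;> rfl
  | cons x xs ih =>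
    cases b with
    | nil => rfl
    | cons y ys => simp only [pvPW, List.zip_cons_cons, pvFirstDiff]; split_ifs <;> simp [ih]

-- entries of the counting pass
theorem pvCounts_fold (s : List Char) (hs : ∀ c ∈ s, c.toNat < 128) (acc : List Nat)
    (hacc : acc.length = 128) (i : Nat) (hi : i < 128) :
    (s.foldl (fun counts ch => counts.set ch.toNat (counts.getD ch.toNat 0 + 1)) acc).getD i 0
      = acc.getD i 0 + s.countP (fun c => c.toNat = i) := by
  induction s generalizing acc with
  | nil => simp
  | cons ch t ih =>
    have hch : ch.toNat < 128 := hs ch (by simp)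
    rw [List.foldl_cons,
      ih (fun c hc => hs c (List.mem_cons_of_mem _ hc)) _ (by rw [List.length_set]; exact hacc) ]
    rw [List.countP_cons]
    by_cases hci : ch.toNat = i
    · rw [List.getD_eq_getElem?_getD, List.getElem?_set, if_pos hci, if_pos (by omega)]
      simp [hci]
      omega
    · rw [List.getD_eq_getElem?_getD, List.getElem?_set, if_neg hci,
        ← List.getD_eq_getElem?_getD]
      simp [hci]

theorem pvCounts_getD (s : List Char) (hs : ∀ c ∈ s, c.toNat < 128) (i : Nat) (hi : i < 128) :
    (pvCounts s).getD i 0 = s.countP (fun c => c.toNat = i) := by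
  unfold pvCounts
  rw [pvCounts_fold s hs _ (by simp) i hi]
  rw [List.getD_eq_getElem?_getD, List.getElem?_replicate, if_pos hi]
  simp

theorem pv_char_toNat_ofNat (i : Nat) (hi : i < 128) : (Char.ofNat i).toNat = i := by
  rw [Char.toNat_ofNat, if_pos (Or.inl (by omega))]

theorem pv_char_lt_of_toNat_lt {a b : Char} (h : a.toNat < b.toNat) : a < b := by
  rw [Char.lt_def, UInt32.lt_iff_toNat_lt]
  exact h

-- count of the 128-bucket join
theorem pv_count_flatMap_rep (ks : List Nat) (f : Nat → Nat) (hks : ∀ k ∈ ks, k < 128)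
    (hnd : ks.Nodup) (c : Char) :
    (ks.flatMap fun k => List.replicate (f k) (Char.ofNat k)).count c
      = if c.toNat ∈ ks then f c.toNat else 0 := by
  induction ks with
  | nil => simp
  | cons k t ih =>
    rcases List.nodup_cons.mp hnd with ⟨hk, hnt⟩
    have hk128 : k < 128 := hks k (by simp)
    rw [List.flatMap_cons, List.count_append,
      ih (fun x hx => hks x (List.mem_cons_of_mem _ hx)) hnt, List.count_replicate]
    by_cases hc : c.toNat = k
    · have hck : Char.ofNat k = c := by rw [← hc, Char.ofNat_toNat]
      rw [if_pos (by simp [hck]), if_neg (by rw [hc]; exact hk), if_pos (by simp [hc]), hc]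
      omega
    · have hck : (Char.ofNat k == c) = false := by
        simp only [beq_eq_false_iff_ne, ne_eq]
        intro h
        exact hc (by rw [← h, pv_char_toNat_ofNat k hk128])
      rw [hck, if_neg (by simp)]
      by_cases hmem : c.toNat ∈ t <;> simp [hmem, hc]

theorem pv_pairwise_le_flatMap_rep (ks : List Nat) (f : Nat → Nat) (hks : ∀ k ∈ ks, k < 128)
    (h : ks.Pairwise (· < ·)) :
    (ks.flatMap fun k => List.replicate (f k) (Char.ofNat k)).Pairwise (· ≤ ·) := by
  induction ks with
  | nil => simp
  | cons k t ih =>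
    rcases List.pairwise_cons.mp h with ⟨hklt, ht⟩
    rw [List.flatMap_cons]
    apply List.pairwise_append.mpr
    refine ⟨List.pairwise_replicate.mpr (Or.inr le_rfl),
      ih (fun x hx => hks x (List.mem_cons_of_mem _ hx)) ht, ?_⟩
    intro x hx y hy
    have hxk : x = Char.ofNat k := List.eq_of_mem_replicate hx
    obtain ⟨k', hk', hy'⟩ := List.mem_flatMap.mp hy
    have hyk : y = Char.ofNat k' := List.eq_of_mem_replicate hy'
    subst hxk; subst hyk
    apply le_of_lt
    apply pv_char_lt_of_toNat_lt
    rw [pv_char_toNat_ofNat k (hks k (by simp)),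
      pv_char_toNat_ofNat k' (hks k' (List.mem_cons_of_mem _ hk'))]
    exact hklt k' hk'

-- the counting sort equals Python's sorted on ASCII input
theorem pvASort_eq_sorted (s : List Char) (hs : ∀ c ∈ s, c.toNat < 128) :
    pvASort s = PySem.List.sorted s (fun x => x) false := by
  unfold pvASort
  symm
  apply PySem.List.sorted_id_eq_of_perm_of_pairwise
  · apply List.perm_iff_count.mpr
    intro c
    have hcnt : ∀ i ∈ List.range 128, (pvCounts s).getD i 0 = s.countP (fun c => c.toNat = i) := by
      intro i hi
      exact pvCounts_getD s hs i (List.mem_range.mp hi)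
    rw [List.flatMap_congr (fun i hi => by rw [hcnt i hi])]
    rw [pv_count_flatMap_rep _ _ (fun k hk => List.mem_range.mp hk) List.nodup_range c]
    by_cases hc : c.toNat < 128
    · rw [if_pos (List.mem_range.mpr hc)]
      rw [List.count_eq_countP]
      apply List.countP_congr
      intro x hx
      constructor
      · intro h
        simp only [decide_eq_true_eq] at h
        have hxc : x = c := by
          have h2 := congrArg Char.ofNat h
          rwa [Char.ofNat_toNat, Char.ofNat_toNat] at h2
        simp [hxc]
      · intro h
        simp only [beq_iff_eq] at h
        simp [h]
    · rw [if_neg (by simp [List.mem_range]; omega)]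
      symm
      apply List.count_eq_zero_of_not_mem
      intro hmem
      exact hc (hs c hmem)
  · exact pv_pairwise_le_flatMap_rep _ _ (fun k hk => List.mem_range.mp hk)
      List.pairwise_lt_range

-- ===== VERDICT (by name: the statement is the Claim_ definition above) =====
theorem find_diff_char_spec : Claim_equal_find_diff_char := by
  intro str1 str2 hd _hp
  have hdom : ∀ (s : String), pvDomStr s = true → ∀ c ∈ s.toList, c.toNat < 128 := by
    intro s hsdom c hc
    have := List.all_eq_true.mp hsdom c hc
    unfold pvDomChar at this
    simp only [Bool.or_eq_true, Bool.and_eq_true, decide_eq_true_eq, beq_iff_eq] at this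
    omega
  unfold Dom_find_diff_char at hd
  rw [Bool.and_eq_true] at hd
  have h1 := hdom str1 hd.1
  have h2 := hdom str2 hd.2
  unfold Spec_find_diff_char find_diff_char find_diff_char_alt
  simp only
  have key : ∀ (a b : String), (∀ c ∈ a.toList, c.toNat < 128) → (∀ c ∈ b.toList, c.toNat < 128) →
      b.toList.length ≤ a.toList.length →
      (match pvAGo (PySem.List.sorted a.toList (fun x => x) false)
          (PySem.List.sorted b.toList (fun x => x) false) 0 with
       | some c => String.ofList [c]
       | none =>
         match PySem.List.pyGet? (PySem.List.sorted a.toList (fun x => x) false) (-1) with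
         | some c => String.ofList [c]
         | none => "") =
      (match pvFirstDiff ((pvASort a.toList).zip (pvASort b.toList)) with
       | some c => String.ofList [c]
       | none =>
         match PySem.List.pyGet? (pvASort a.toList) (-1) with
         | some c => String.ofList [c]
         | none => "") := by
    intro a b ha hb hlen
    rw [pvASort_eq_sorted a.toList ha, pvASort_eq_sorted b.toList hb]
    rw [pvAGo_eq_pvPW _ _ (by rw [PySem.List.length_sorted, PySem.List.length_sorted]; exact hlen) 0]
    simp only [List.drop_zero]
    rw [pvPW_eq_firstDiff_zip]
  by_cases hgt : str1.toList.length > str2.toList.length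
  · simp only [hgt, if_pos, show ¬ (str1.toList.length < str2.toList.length) by omega, ite_false]
    exact key str1 str2 h1 h2 (by omega)
  · by_cases hlt : str1.toList.length < str2.toList.length
    · simp only [hgt, hlt, ite_false, ite_true]
      exact key str2 str1 h2 h1 (by omega)
    · simp only [hgt, hlt, ite_false]
      exact key str2 str2 h2 h2 (by omega)
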